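-- pv_equiv track=rewrite | github.com/matterhorn103/quanstants | quanstants/format.py | truncate_digits
-- ===== SOURCE A (Python) =====
-- def truncate_digits(
--         integer: str,
--         fraction: str,
--         threshold: int = 8,
--     ) -> tuple[str, str, str]:
--     """Limit a long decimal in length and abbreviate truncated digits as an ellipsis."""
--
--     places = len(fraction)
--     # Work out number of sigfigs
--     figures_integer = 0
--     figures = 0
--     for digit in integer:
--         if digit != "0" or figures > 0:
--             figures_integer += 1
--             figures += 1
--     for digit in fraction:
--         if digit != "0" or figures > 0:
--             figures += 1
--
--     # With threshold = 2 we want to truncate e.g.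
--     # 2.456 to 2 d.p. -> 2.45…
--     # 0.0002456 to 2 s.f. -> 0.00024…
--     # 0.0002 not at all
--     # 245.6 not at all
--     # 0.2456 to either 2 d.p. or 2 s.f. -> 0.24…
--     if places > threshold and figures > threshold:
--         ellipsis = "…"
--         if places < figures:
--             fraction = fraction[:threshold]
--         else:
--             n_to_keep = threshold - figures_integer
--             fraction = fraction[:n_to_keep]
--     else:
--         ellipsis = ""
--
--     return integer, fraction, ellipsis
-- ===== SOURCE B (Python) =====
-- def truncate_digits(
--         integer: str,
--         fraction: str,
--         threshold: int = 8,
--     ) -> tuple[str, str, str]: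
--     """Limit a long decimal in length and abbreviate truncated digits as an ellipsis.
--
--     No significant-figure counting: truncation happens exactly when the fraction is
--     longer than the threshold and either the integer part contains a nonzero digit
--     (then every fractional place is significant) or the fraction has more than
--     `threshold` digits after its leading zeros; and in every such case exactly
--     `threshold` fractional digits are kept.
--     """
--     if len(fraction) > threshold and (
--         integer.lstrip("0") != "" or len(fraction.lstrip("0")) > threshold
--     ):
--         return integer, fraction[:threshold], "…"
--     return integer, fraction, ""
-- ===== Notes on version B (the rewrite author's own statement) =====
-- stated objective: simpler
-- what changed: B drops A's significant-figure counting entirely: it follows from A's arithmetic that the kept fraction length is always exactly threshold (in both of A's slice branches) and that A's condition collapses to 'len(fraction) > threshold and (integer has a nonzero character or the fraction after its leading zeros is longer than threshold)', so B is a single if with one slice and no counters (the per-character Python loops disappear, replaced by built-in lstrip/len).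
import Mathlib
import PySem

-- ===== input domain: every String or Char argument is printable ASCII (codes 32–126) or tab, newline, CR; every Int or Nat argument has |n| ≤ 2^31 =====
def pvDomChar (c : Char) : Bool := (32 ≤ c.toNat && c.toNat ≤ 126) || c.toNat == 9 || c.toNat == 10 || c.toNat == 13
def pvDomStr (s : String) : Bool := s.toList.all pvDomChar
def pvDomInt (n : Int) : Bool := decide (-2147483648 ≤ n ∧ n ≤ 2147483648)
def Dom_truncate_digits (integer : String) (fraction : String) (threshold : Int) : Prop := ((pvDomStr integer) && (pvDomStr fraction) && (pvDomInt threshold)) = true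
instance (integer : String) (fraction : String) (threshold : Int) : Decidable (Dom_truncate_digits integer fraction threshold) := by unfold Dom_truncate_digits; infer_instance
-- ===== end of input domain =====

-- B removes A's significant-figure counting: the kept length is provably always
-- `threshold` and A's condition collapses to one boolean test (simpler, same O(n) cost).

-- ===== PORT A =====
def truncate_digits (integer : String) (fraction : String) (threshold : Int) : String × String × String :=
  let places : Int := (fraction.toList.length : Int)
  -- for digit in integer: if digit != "0" or figures > 0: figures_integer += 1; figures += 1
  let st : Int × Int := integer.toList.foldl
    (fun (p : Int × Int) digit => if digit ≠ '0' ∨ 0 < p.2 then (p.1 + 1, p.2 + 1) else p) (0, 0)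
  -- for digit in fraction: if digit != "0" or figures > 0: figures += 1
  let figures : Int := fraction.toList.foldl
    (fun (f : Int) digit => if digit ≠ '0' ∨ 0 < f then f + 1 else f) st.2
  if places > threshold ∧ figures > threshold then
    if places < figures then
      (integer, String.ofList (PySem.List.slice fraction.toList none (some threshold)), "…")
    else
      (integer, String.ofList (PySem.List.slice fraction.toList none (some (threshold - st.1))), "…")
  else
    (integer, fraction, "")

-- ===== PORT B =====
def truncate_digits_alt (integer : String) (fraction : String) (threshold : Int) : String × String × String :=
  -- if len(fraction) > threshold and (integer.lstrip("0") != "" or len(fraction.lstrip("0")) > threshold)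
  if (fraction.toList.length : Int) > threshold ∧
     (integer.toList.dropWhile (· == '0') ≠ [] ∨
      ((fraction.toList.dropWhile (· == '0')).length : Int) > threshold) then
    (integer, String.ofList (PySem.List.slice fraction.toList none (some threshold)), "…")
  else
    (integer, fraction, "")

-- ===== PRECONDITION & SPEC =====
def Spec_truncate_digits (integer : String) (fraction : String) (threshold : Int) (out : String × String × String) : Prop := out = truncate_digits_alt integer fraction threshold
instance (integer : String) (fraction : String) (threshold : Int) (out : String × String × String) : Decidable (Spec_truncate_digits integer fraction threshold out) := by unfold Spec_truncate_digits; infer_instance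

-- ===== CLAIM (what is proved, stated in full; the proofs are below) =====
def Claim_equal_truncate_digits : Prop := ∀ (integer : String) (fraction : String) (threshold : Int), Dom_truncate_digits integer fraction threshold → Spec_truncate_digits integer fraction threshold (truncate_digits integer fraction threshold)

-- ===== LEMMAS AND PROOFS =====

-- once figures is positive, A's fraction loop counts every remaining character
lemma fracFold_pos (cs : List Char) : ∀ (n : Int), 0 < n →
    cs.foldl (fun (f : Int) digit => if digit ≠ '0' ∨ 0 < f then f + 1 else f) n
      = n + (cs.length : Int) := by
  induction cs with
  | nil => intro n _; simp
  | cons c t ih =>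
      intro n hn
      simp only [List.foldl_cons, if_pos (Or.inr hn)]
      rw [ih (n + 1) (by omega)]
      simp only [List.length_cons]; push_cast; ring

-- A's fraction loop from 0 counts the characters after the leading '0'-run
lemma fracFold_zero (cs : List Char) :
    cs.foldl (fun (f : Int) digit => if digit ≠ '0' ∨ 0 < f then f + 1 else f) 0
      = ((cs.dropWhile (· == '0')).length : Int) := by
  induction cs with
  | nil => simp
  | cons c t ih =>
      by_cases hc : c = '0'
      · subst hc
        simpa [List.dropWhile] using ih
      · simp only [List.foldl_cons, if_pos (Or.inl hc)]
        rw [fracFold_pos t (0 + 1) (by omega)]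
        simp only [List.dropWhile_cons, beq_iff_eq, if_neg hc, List.length_cons]
        push_cast; omega

-- once figures is positive, A's integer loop counts every remaining character in both components
lemma intFold_pos (cs : List Char) : ∀ (n : Int), 0 < n →
    cs.foldl (fun (p : Int × Int) digit => if digit ≠ '0' ∨ 0 < p.2 then (p.1 + 1, p.2 + 1) else p) (n, n)
      = (n + (cs.length : Int), n + (cs.length : Int)) := by
  induction cs with
  | nil => intro n _; simp
  | cons c t ih =>
      intro n hn
      simp only [List.foldl_cons, if_pos (Or.inr hn)]
      rw [ih (n + 1) (by omega)]
      simp only [Prod.mk.injEq, List.length_cons]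
      push_cast; omega

-- A's integer loop computes (len(integer.lstrip('0')), same) in both components
lemma intFold_zero (cs : List Char) :
    cs.foldl (fun (p : Int × Int) digit => if digit ≠ '0' ∨ 0 < p.2 then (p.1 + 1, p.2 + 1) else p) (0, 0)
      = (((cs.dropWhile (· == '0')).length : Int), ((cs.dropWhile (· == '0')).length : Int)) := by
  induction cs with
  | nil => simp
  | cons c t ih =>
      by_cases hc : c = '0'
      · subst hc
        simpa [List.dropWhile] using ih
      · simp only [List.foldl_cons, if_pos (Or.inl hc)]
        rw [intFold_pos t (0 + 1, 0 + 1).1 (by omega)]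
        simp only [List.dropWhile_cons, beq_iff_eq, if_neg hc, List.length_cons, Prod.mk.injEq]
        push_cast; omega

-- ===== VERDICT (by name: the statement is the Claim_ definition above) =====
theorem truncate_digits_spec : Claim_equal_truncate_digits := by
  intro integer fraction threshold _
  show truncate_digits integer fraction threshold = truncate_digits_alt integer fraction threshold
  by_cases hfi : integer.toList.dropWhile (· == '0') = []
  · -- integer is all zeros: figures counts fraction after its leading zeros
    have hfs : ((fraction.toList.dropWhile (· == '0')).length : Int)
        ≤ (fraction.toList.length : Int) := by
      exact_mod_cast List.length_dropWhile_le _ _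
    simp only [truncate_digits, truncate_digits_alt, intFold_zero, hfi, fracFold_zero,
      List.length_nil, Nat.cast_zero]
    by_cases h : (fraction.toList.length : Int) > threshold ∧
        ((fraction.toList.dropWhile (· == '0')).length : Int) > threshold
    · rw [if_pos h, if_neg (by omega), if_pos ⟨h.1, Or.inr h.2⟩, sub_zero]
    · rw [if_neg h, if_neg (by
        rintro ⟨a, h2 | h2⟩
        · exact h2 rfl
        · exact h ⟨a, h2⟩)]
  · -- integer has a nonzero character: every fractional place is significant
    have hpos : (0 : Int) < ((integer.toList.dropWhile (· == '0')).length : Int) := by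
      have := List.length_pos_of_ne_nil hfi; exact_mod_cast this
    simp only [truncate_digits, truncate_digits_alt, intFold_zero,
      fracFold_pos fraction.toList _ hpos]
    by_cases hpt : (fraction.toList.length : Int) > threshold
    · rw [if_pos ⟨hpt, by omega⟩, if_pos (by omega), if_pos ⟨hpt, Or.inl hfi⟩]
    · rw [if_neg (by rintro ⟨a, _⟩; exact hpt a), if_neg (by rintro ⟨a, _⟩; exact hpt a)]
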